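-- pv_equiv track=rewrite | github.com/xieliangji/automation-box | smart_monkey/app_runtime.py | _tag_bucket
-- ===== SOURCE A (Python) =====
-- def _tag_bucket(tags: set[str]) -> str:
--     lowered = {str(tag).lower() for tag in tags}
--     if lowered & {"login", "登录", "password", "密码", "account", "账号"}:
--         return "auth"
--     if lowered & {"detail", "details", "详情", "next", "下一步"}:
--         return "detail"
--     if lowered & {"save", "保存", "submit", "提交", "done"}:
--         return "submit"
--     if lowered & {"scroll", "swipe", "pinch", "zoom", "pinch_in", "pinch_out"}:
--         return "scroll"
--     return "generic"
-- ===== SOURCE B (Python) =====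
-- _KEYWORD_RANK = {
--     **dict.fromkeys(("login", "登录", "password", "密码", "account", "账号"), 0),
--     **dict.fromkeys(("detail", "details", "详情", "next", "下一步"), 1),
--     **dict.fromkeys(("save", "保存", "submit", "提交", "done"), 2),
--     **dict.fromkeys(("scroll", "swipe", "pinch", "zoom", "pinch_in", "pinch_out"), 3),
-- }
--
-- _RANK_LABEL = ("auth", "detail", "submit", "scroll", "generic")
--
--
-- def _tag_bucket(tags: set[str]) -> str:
--     best = 4
--     for tag in tags:
--         best = min(best, _KEYWORD_RANK.get(str(tag).lower(), 4))
--     return _RANK_LABEL[best]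
-- ===== Notes on version B (the rewrite author's own statement) =====
-- stated objective: alternative
-- what changed: Replaces the four sequential set-intersection tests with a single accumulating pass that looks each lowered tag up in one keyword->priority dict, keeps the minimum priority, and maps it back to a label through a rank->label tuple.
import Mathlib
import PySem

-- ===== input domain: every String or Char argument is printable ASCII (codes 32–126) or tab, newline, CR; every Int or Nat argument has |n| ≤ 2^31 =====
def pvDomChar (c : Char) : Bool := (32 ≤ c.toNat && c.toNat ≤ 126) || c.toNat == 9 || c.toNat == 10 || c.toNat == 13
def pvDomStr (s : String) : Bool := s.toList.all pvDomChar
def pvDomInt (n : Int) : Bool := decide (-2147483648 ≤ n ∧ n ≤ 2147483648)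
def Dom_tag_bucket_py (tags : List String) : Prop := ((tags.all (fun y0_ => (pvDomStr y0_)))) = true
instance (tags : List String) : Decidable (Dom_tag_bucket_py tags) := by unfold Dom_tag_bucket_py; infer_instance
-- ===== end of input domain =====

-- B replaces A's four sequential set-intersection tests by one accumulating min-priority
-- pass over the tags with a keyword->rank dict and a rank->label table (alternative
-- decomposition, same asymptotic cost).


-- ===== PORT A =====
def kwAuth : List String := ["login", "登录", "password", "密码", "account", "账号"]
def kwDetail : List String := ["detail", "details", "详情", "next", "下一步"]
def kwSubmit : List String := ["save", "保存", "submit", "提交", "done"]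
def kwScroll : List String := ["scroll", "swipe", "pinch", "zoom", "pinch_in", "pinch_out"]

def tag_bucket_py (tags : List String) : String :=
  let lowered : PySem.Set String := PySem.Set.ofList (tags.map (fun tag => PySem.Str.lower tag))
  if PySem.Set.inter lowered (PySem.Set.ofList kwAuth) ≠ [] then "auth"
  else if PySem.Set.inter lowered (PySem.Set.ofList kwDetail) ≠ [] then "detail"
  else if PySem.Set.inter lowered (PySem.Set.ofList kwSubmit) ≠ [] then "submit"
  else if PySem.Set.inter lowered (PySem.Set.ofList kwScroll) ≠ [] then "scroll"
  else "generic"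

-- ===== PORT B =====
def KEYWORD_RANK : PySem.Dict String Nat := PySem.Dict.mk
  [("login", 0), ("登录", 0), ("password", 0), ("密码", 0), ("account", 0), ("账号", 0),
   ("detail", 1), ("details", 1), ("详情", 1), ("next", 1), ("下一步", 1),
   ("save", 2), ("保存", 2), ("submit", 2), ("提交", 2), ("done", 2),
   ("scroll", 3), ("swipe", 3), ("pinch", 3), ("zoom", 3), ("pinch_in", 3), ("pinch_out", 3)]

def RANK_LABEL : List String := ["auth", "detail", "submit", "scroll", "generic"]

def tag_bucket_py_alt (tags : List String) : String :=
  let best := tags.foldl (fun best tag => min best (PySem.Dict.getD KEYWORD_RANK (PySem.Str.lower tag) 4)) 4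
  -- _RANK_LABEL[best]: best starts at 4 and only decreases, so the index is always in range
  RANK_LABEL.getD best "generic"

-- ===== PRECONDITION & SPEC =====
def Spec_tag_bucket_py (tags : List String) (out : String) : Prop := out = tag_bucket_py_alt tags
instance (tags : List String) (out : String) : Decidable (Spec_tag_bucket_py tags out) := by unfold Spec_tag_bucket_py; infer_instance

-- ===== CLAIM (what is proved, stated in full; the proofs are below) =====
def Claim_equal_tag_bucket_py : Prop := ∀ (tags : List String), Dom_tag_bucket_py tags → Spec_tag_bucket_py tags (tag_bucket_py tags)

-- ===== LEMMAS AND PROOFS =====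

-- the rank B assigns to a tag
def rk (t : String) : Nat := PySem.Dict.getD KEYWORD_RANK (PySem.Str.lower t) 4

-- generic association-list lookup facts (avoid a 22-way literal case split)
lemma findD_eq_iff (entries : List (String × Nat)) (s : String) (d i : Nat)
    (hid : i ≠ d) (hnd : (entries.map Prod.fst).Nodup) :
    (((entries.find? (fun p => p.1 == s)).map Prod.snd).getD d = i) ↔
      s ∈ (entries.filter (fun p => p.2 == i)).map Prod.fst := by
  induction entries with
  | nil => simpa using fun h => hid h.symm
  | cons p rest ih =>
      simp only [List.map_cons, List.nodup_cons] at hnd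
      by_cases h : p.1 == s
      · have hs : p.1 = s := by simpa using h
        simp only [List.find?_cons, h, Option.map_some, Option.getD_some, List.filter_cons]
        by_cases hv : p.2 = i
        · simp [hv, hs]
        · have hnot : s ∉ (List.filter (fun p => p.2 == i) rest).map Prod.fst := by
            intro hmem
            apply hnd.1
            rw [hs]
            rcases List.mem_map.mp hmem with ⟨q, hq, hq1⟩
            exact List.mem_map.mpr ⟨q, List.mem_of_mem_filter hq, hq1⟩
          simp [hv, hnot]
      · have hs : p.1 ≠ s := by simpa using h
        simp only [List.find?_cons, h, List.filter_cons]
        rw [ih hnd.2]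
        by_cases hv : p.2 = i <;> simp [hv, Ne.symm hs]

lemma rk_unfold (t : String) :
    rk t = ((KEYWORD_RANK.items.find? (fun p => p.1 == PySem.Str.lower t)).map Prod.snd).getD 4 := rfl

lemma keys_nodup : (KEYWORD_RANK.items.map Prod.fst).Nodup := by decide

lemma rk_eq_zero_iff (t : String) : rk t = 0 ↔ PySem.Str.lower t ∈ kwAuth := by
  rw [rk_unfold, findD_eq_iff _ _ _ _ (by omega) keys_nodup]
  rfl

lemma rk_eq_one_iff (t : String) : rk t = 1 ↔ PySem.Str.lower t ∈ kwDetail := by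
  rw [rk_unfold, findD_eq_iff _ _ _ _ (by omega) keys_nodup]
  rfl

lemma rk_eq_two_iff (t : String) : rk t = 2 ↔ PySem.Str.lower t ∈ kwSubmit := by
  rw [rk_unfold, findD_eq_iff _ _ _ _ (by omega) keys_nodup]
  rfl

lemma rk_eq_three_iff (t : String) : rk t = 3 ↔ PySem.Str.lower t ∈ kwScroll := by
  rw [rk_unfold, findD_eq_iff _ _ _ _ (by omega) keys_nodup]
  rfl

-- A's intersection-nonemptiness test is an existential over the original tags
lemma inter_ne_nil_iff (tags : List String) (kw : List String) :
    PySem.Set.inter (PySem.Set.ofList (tags.map (fun tag => PySem.Str.lower tag))) (PySem.Set.ofList kw) ≠ [] ↔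
      ∃ t ∈ tags, PySem.Str.lower t ∈ kw := by
  rw [Ne, List.eq_nil_iff_forall_not_mem]
  push Not
  constructor
  · rintro ⟨x, hx⟩
    rw [PySem.Set.inter] at hx
    have hmem := List.mem_of_mem_filter hx
    have hcont := List.of_mem_filter hx
    rw [PySem.Set.mem_ofList] at hmem
    rcases List.mem_map.mp hmem with ⟨t, ht, rfl⟩
    refine ⟨t, ht, ?_⟩
    have : PySem.Str.lower t ∈ PySem.Set.ofList kw := by
      simpa using hcont
    rwa [PySem.Set.mem_ofList] at this
  · rintro ⟨t, ht, hkw⟩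
    refine ⟨PySem.Str.lower t, ?_⟩
    rw [PySem.Set.inter, List.mem_filter]
    constructor
    · rw [PySem.Set.mem_ofList]
      exact List.mem_map.mpr ⟨t, ht, rfl⟩
    · simpa using (PySem.Set.mem_ofList (y := PySem.Str.lower t) (xs := kw)).mpr hkw

-- foldr normal form of B's min pass
def nrank (tags : List String) : Nat := tags.foldr (fun t n => min (rk t) n) 4

lemma nrank_le_4 (tags : List String) : nrank tags ≤ 4 := by
  induction tags with
  | nil => simp [nrank]
  | cons t r ih => simp only [nrank, List.foldr_cons] at *; omega

lemma foldl_min_eq (tags : List String) (a : Nat) (ha : a ≤ 4) :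
    tags.foldl (fun best tag => min best (PySem.Dict.getD KEYWORD_RANK (PySem.Str.lower tag) 4)) a
      = min a (nrank tags) := by
  induction tags generalizing a with
  | nil =>
      simp only [List.foldl_nil, nrank, List.foldr_nil]
      omega
  | cons t r ih =>
      simp only [List.foldl_cons, nrank, List.foldr_cons] at *
      rw [show PySem.Dict.getD KEYWORD_RANK (PySem.Str.lower t) 4 = rk t from rfl,
          ih _ (by omega)]
      omega

lemma nrank_le_iff (tags : List String) (k : Nat) :
    nrank tags ≤ k ↔ 4 ≤ k ∨ ∃ t ∈ tags, rk t ≤ k := by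
  induction tags with
  | nil => simp [nrank]
  | cons t r ih =>
      simp only [nrank, List.foldr_cons, min_le_iff] at *
      constructor
      · rintro (h | h)
        · exact Or.inr ⟨t, by simp, h⟩
        · rcases ih.mp h with h | ⟨u, hu, hk⟩
          · exact Or.inl h
          · exact Or.inr ⟨u, by simp [hu], hk⟩
      · rintro (h | ⟨u, hu, hk⟩)
        · exact Or.inr (ih.mpr (Or.inl h))
        · rcases List.mem_cons.mp hu with rfl | hu
          · exact Or.inl hk
          · exact Or.inr (ih.mpr (Or.inr ⟨u, hu, hk⟩))

lemma cond_imp (tags : List String) (i : Nat) (h : ∃ t ∈ tags, rk t = i) : nrank tags ≤ i := by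
  rcases h with ⟨t, ht, hr⟩
  exact (nrank_le_iff tags i).mpr (Or.inr ⟨t, ht, hr.le⟩)

lemma cond_of_eq (tags : List String) (v : Nat) (hv : v < 4) (h : nrank tags = v) :
    ∃ t ∈ tags, rk t = v := by
  have h1 : nrank tags ≤ v := h.le
  rcases (nrank_le_iff tags v).mp h1 with h4 | ⟨t, ht, hle⟩
  · omega
  · rcases Nat.eq_zero_or_pos v with rfl | hpos
    · exact ⟨t, ht, Nat.le_zero.mp hle⟩
    · by_cases hlt : rk t ≤ v - 1
      · exfalso
        have hle' : nrank tags ≤ v - 1 := (nrank_le_iff tags (v - 1)).mpr (Or.inr ⟨t, ht, hlt⟩)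
        omega
      · exact ⟨t, ht, by omega⟩

-- ===== VERDICT (by name: the statement is the Claim_ definition above) =====
theorem tag_bucket_py_spec : Claim_equal_tag_bucket_py := by
  intro tags _
  show tag_bucket_py tags = tag_bucket_py_alt tags
  unfold tag_bucket_py tag_bucket_py_alt
  rw [foldl_min_eq tags 4 (by omega)]
  have hmin : min 4 (nrank tags) = nrank tags := by
    have := nrank_le_4 tags; omega
  rw [hmin]
  have h0 := (inter_ne_nil_iff tags kwAuth).trans
    (exists_congr fun t => and_congr_right fun _ => (rk_eq_zero_iff t).symm)
  have h1 := (inter_ne_nil_iff tags kwDetail).trans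
    (exists_congr fun t => and_congr_right fun _ => (rk_eq_one_iff t).symm)
  have h2 := (inter_ne_nil_iff tags kwSubmit).trans
    (exists_congr fun t => and_congr_right fun _ => (rk_eq_two_iff t).symm)
  have h3 := (inter_ne_nil_iff tags kwScroll).trans
    (exists_congr fun t => and_congr_right fun _ => (rk_eq_three_iff t).symm)
  have h4 := nrank_le_4 tags
  set n := nrank tags with hn
  interval_cases n
  · rw [if_pos (h0.mpr (cond_of_eq tags 0 (by omega) hn.symm))]; rfl
  · rw [if_neg (fun hc => by have := cond_imp tags 0 (h0.mp hc); omega),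
        if_pos (h1.mpr (cond_of_eq tags 1 (by omega) hn.symm))]; rfl
  · rw [if_neg (fun hc => by have := cond_imp tags 0 (h0.mp hc); omega),
        if_neg (fun hc => by have := cond_imp tags 1 (h1.mp hc); omega),
        if_pos (h2.mpr (cond_of_eq tags 2 (by omega) hn.symm))]; rfl
  · rw [if_neg (fun hc => by have := cond_imp tags 0 (h0.mp hc); omega),
        if_neg (fun hc => by have := cond_imp tags 1 (h1.mp hc); omega),
        if_neg (fun hc => by have := cond_imp tags 2 (h2.mp hc); omega),
        if_pos (h3.mpr (cond_of_eq tags 3 (by omega) hn.symm))]; rfl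
  · rw [if_neg (fun hc => by have := cond_imp tags 0 (h0.mp hc); omega),
        if_neg (fun hc => by have := cond_imp tags 1 (h1.mp hc); omega),
        if_neg (fun hc => by have := cond_imp tags 2 (h2.mp hc); omega),
        if_neg (fun hc => by have := cond_imp tags 3 (h3.mp hc); omega)]; rfl
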